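-- pv_equiv track=rewrite | github.com/chris-kuo/elements_of_programming_interview | src/arrays.py | m_times_to_twice
-- ===== SOURCE A (Python) =====
-- def m_times_to_twice(arr, m):
-- 	'''
-- 	if an item appears exactly m times in sorted array arr, it is
-- 	updated to appear exactly twice
-- 	'''
-- 	if not arr:
-- 		return arr
-- 	occurrences = 0
-- 	next_pos = 0
-- 	val = arr[0]
-- 	for i in range(len(arr)):
-- 		if arr[i] == val:
-- 			occurrences += 1
-- 		else: # val != arr[i]
-- 			# check occurrences
-- 			if occurrences == m:
-- 				arr[next_pos], arr[next_pos+1] = val, val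
-- 				next_pos += 2
-- 				val = arr[i]
-- 				occurrences = 1
-- 			else:
-- 				arr[next_pos:next_pos+occurrences] = [val] * occurrences
-- 				next_pos += occurrences
-- 				val = arr[i]
-- 				occurrences = 1
-- 	# fill in occurrences of last unique number
-- 	arr[next_pos:next_pos+occurrences] = [val] * occurrences
-- 	del arr[next_pos + occurrences:]
-- 	return arr
-- ===== SOURCE B (Python) =====
-- def m_times_to_twice(arr, m):
-- 	'''
-- 	if an item appears exactly m times in sorted array arr, it is
-- 	updated to appear exactly twice
-- 	'''
-- 	result = []
-- 	i, n = 0, len(arr)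
-- 	while i < n:
-- 		j = i
-- 		while j < n and arr[j] == arr[i]:
-- 			j += 1
-- 		k = j - i
-- 		result += [arr[i]] * (2 if k == m else k)
-- 		i = j
-- 	arr[:] = result
-- 	return arr
-- ===== Notes on version B (the rewrite author's own statement) =====
-- stated objective: simpler
-- what changed: A compacts the array in place with a two-pointer scheme of element writes, slice-assignments and a final del; B scans the runs of equal elements with an index pair and rebuilds a fresh result list (appending two copies when a run has length m, else the run itself), then overwrites arr[:] with it, which also applies the m->2 rule to the last run where A forgets it.
-- intended difference: On arrays whose last run of equal elements has length exactly m (m != 2), A returns that run unchanged (e.g. [5,5,5], m=3 -> [5,5,5]) while B returns it reduced to two copies ([5,5]), which is what the docstring ('appears exactly m times ... updated to appear exactly twice') intends: A's boundary check is only triggered when a different value follows, so the final run is never checked. — e.g. on m_times_to_twice([1, 1, 1], 3): A returns [1, 1, 1], B returns [1, 1]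
-- outside the precondition, e.g. on m_times_to_twice([1, 2], 1): A returns [1, 1, 1], B returns [1, 1, 2, 2]; on m_times_to_twice([1, 2, 3], 1): A raises IndexError, B returns [1, 1, 2, 2, 3, 3]; on m_times_to_twice([3, 1, 3], 1): A returns [3, 3, 3, 3], B returns [3, 3, 1, 1, 3, 3]
import Mathlib
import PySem

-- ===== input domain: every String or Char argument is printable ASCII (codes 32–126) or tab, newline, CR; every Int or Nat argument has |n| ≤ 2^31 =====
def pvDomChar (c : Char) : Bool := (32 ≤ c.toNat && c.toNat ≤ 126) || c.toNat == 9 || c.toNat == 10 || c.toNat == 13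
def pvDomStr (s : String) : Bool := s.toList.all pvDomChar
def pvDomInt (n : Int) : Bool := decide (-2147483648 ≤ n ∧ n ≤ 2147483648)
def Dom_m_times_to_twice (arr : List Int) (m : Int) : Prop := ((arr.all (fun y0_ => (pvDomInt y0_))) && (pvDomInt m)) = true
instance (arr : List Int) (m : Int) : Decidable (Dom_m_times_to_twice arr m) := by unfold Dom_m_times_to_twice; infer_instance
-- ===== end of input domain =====

-- B rebuilds the array from its runs of equal elements into a fresh list instead of compacting it in
-- place with two pointers; B also applies the m->2 rule to the LAST run, which A never checks (D_ below).
-- Both Pythons mutate arr in place and return it; the final contents and the return value coincide.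


-- ===== PORT A =====
-- arr[a:a+k] = [v]*k  (0 ≤ a ≤ a+k: Python clamps a past-the-end start exactly like take/drop do)
def pvSliceAssign (l : List Int) (a k : Nat) (v : Int) : List Int :=
  (l.take a ++ List.replicate k v) ++ l.drop (a + k)

-- one iteration of A's for-loop; state (arr, occurrences, next_pos, val)
def pvStepA (m : Int) (s : List Int × Int × Int × Int) (i : Int) : List Int × Int × Int × Int :=
  match s with
  | (l, occ, np, val) =>
    let x := (PySem.List.pyGet? l i).getD 0   -- arr[i]; in range while the loop runs
    if x = val then (l, occ + 1, np, val)
    else if occ = m then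
      -- arr[next_pos], arr[next_pos+1] = val, val
      -- (Python raises IndexError when next_pos+1 ≥ len(arr); that happens only outside Pre_,
      --  so List.set's out-of-range no-op is never reached by the claims)
      (((l.set np.toNat val).set (np + 1).toNat val), 1, np + 2, x)
    else
      (pvSliceAssign l np.toNat occ.toNat val, 1, np + occ, x)

-- the code after the loop: final slice assignment, then 'del arr[next_pos+occurrences:]'
def pvFinA (s : List Int × Int × Int × Int) : List Int :=
  match s with
  | (l, occ, np, val) =>
    (pvSliceAssign l np.toNat occ.toNat val).take (np + occ).toNat

def m_times_to_twice (arr : List Int) (m : Int) : List Int :=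
  if arr = [] then arr
  else
    pvFinA ((PySem.List.pyRange 0 (arr.length : Int)).foldl (pvStepA m)
      (arr, 0, 0, (PySem.List.pyGet? arr 0).getD 0))

-- ===== PORT B =====
-- Source B's outer while-loop: take the run of elements equal to arr[i] (the inner while), append two
-- copies when its length is m and the run itself otherwise, continue after the run.  The fuel
-- argument only makes the recursion structural; it starts at length+1 and never runs out.
def pvAltGoFuel (m : Int) : Nat → List Int → List Int
  | 0, _ => []
  | _ + 1, [] => []
  | f + 1, x :: xs =>
    let k := 1 + (xs.takeWhile (· == x)).length
    (if (k : Int) = m then List.replicate 2 x else List.replicate k x) ++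
      pvAltGoFuel m f (xs.dropWhile (· == x))

def m_times_to_twice_alt (arr : List Int) (m : Int) : List Int :=
  pvAltGoFuel m (arr.length + 1) arr

-- ===== PRECONDITION & SPEC =====
-- does some run of equal elements have length exactly 1?
def pvHasSingle (val : Int) (occ : Nat) : List Int → Bool
  | [] => occ == 1
  | x :: u => if x = val then pvHasSingle val (occ + 1) u else ((occ == 1) || pvHasSingle x 1 u)

def pvAnySingle : List Int → Bool
  | [] => false
  | a :: r => pvHasSingle a 1 r

-- Pre_ excludes exactly m = 1 on arrays containing a run of length 1: there A's two-slot doubling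
-- writes at or past the index it is about to read, so A either raises IndexError or returns values
-- read back from the already-overwritten array (an accident of the in-place scheme).
def Pre_m_times_to_twice (arr : List Int) (m : Int) : Prop := ¬ (m = 1 ∧ pvAnySingle arr = true)
instance (arr : List Int) (m : Int) : Decidable (Pre_m_times_to_twice arr m) := by
  unfold Pre_m_times_to_twice; infer_instance

def pvWitness_m_times_to_twice : List Int × Int := ([1, 1, 2, 2], 3)

-- On arrays whose last run of equal elements has length exactly m (m ≠ 2), A returns that run
-- unchanged while B reduces it to two copies, which is what the docstring intends: A checks a run's
-- length only when a different value follows it, so the final run is never checked.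
def D_m_times_to_twice (arr : List Int) (m : Int) : Prop :=
  m ≠ 2 ∧ arr ≠ [] ∧
    (((arr.reverse.takeWhile (fun y => y == arr.reverse.headD 0)).length : Nat) : Int) = m
instance (arr : List Int) (m : Int) : Decidable (D_m_times_to_twice arr m) := by
  unfold D_m_times_to_twice; infer_instance

def Spec_m_times_to_twice (arr : List Int) (m : Int) (out : List Int) : Prop :=
  ¬ D_m_times_to_twice arr m → out = m_times_to_twice_alt arr m
instance (arr : List Int) (m : Int) (out : List Int) : Decidable (Spec_m_times_to_twice arr m out) := by
  unfold Spec_m_times_to_twice; infer_instance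

def pvDiffWitness_m_times_to_twice : List Int × Int := ([1, 1, 1], 3)
def pvDiffWitnessOut_m_times_to_twice : (List Int) × (List Int) := ([1, 1, 1], [1, 1])

-- ===== CLAIM (what is proved, stated in full; the proofs are below) =====
def Claim_unchanged_m_times_to_twice : Prop := ∀ (arr : List Int) (m : Int), Dom_m_times_to_twice arr m → Pre_m_times_to_twice arr m → Spec_m_times_to_twice arr m (m_times_to_twice arr m)
def Claim_changed_m_times_to_twice : Prop := Dom_m_times_to_twice (pvDiffWitness_m_times_to_twice.1) (pvDiffWitness_m_times_to_twice.2) ∧ Pre_m_times_to_twice (pvDiffWitness_m_times_to_twice.1) (pvDiffWitness_m_times_to_twice.2) ∧ D_m_times_to_twice (pvDiffWitness_m_times_to_twice.1) (pvDiffWitness_m_times_to_twice.2) ∧ m_times_to_twice (pvDiffWitness_m_times_to_twice.1) (pvDiffWitness_m_times_to_twice.2) = pvDiffWitnessOut_m_times_to_twice.1 ∧ m_times_to_twice_alt (pvDiffWitness_m_times_to_twice.1) (pvDiffWitness_m_times_to_twice.2) = pvDiffWitnessOut_m_times_to_twice.2 ∧ pvDiffWitnessOut_m_times_to_twice.1 ≠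 pvDiffWitnessOut_m_times_to_twice.2
def Claim_exact_m_times_to_twice : Prop := ∀ (arr : List Int) (m : Int), Dom_m_times_to_twice arr m → Pre_m_times_to_twice arr m → D_m_times_to_twice arr m → m_times_to_twice arr m ≠ m_times_to_twice_alt arr m

-- ===== LEMMAS AND PROOFS =====

-- A's loop, abstracted to the run structure it consumes: pvProcA m val occ u is what A appends to the
-- finished prefix, given a pending run of occ copies of val followed by the unread suffix u.
def pvProcA (m : Int) (val : Int) (occ : Nat) : List Int → List Int
  | [] => List.replicate occ val
  | x :: u =>
    if x = val then pvProcA m val (occ + 1) u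
    else
      (if (occ : Int) = m then List.replicate 2 val else List.replicate occ val) ++ pvProcA m x 1 u

-- length of the last run of equal elements of (replicate occ val ++ u); A's final 'occurrences'
def pvLastOcc (val : Int) (occ : Nat) : List Int → Nat
  | [] => occ
  | x :: u => if x = val then pvLastOcc val (occ + 1) u else pvLastOcc x 1 u

lemma pv_tw (h x val : Int) (occ : Nat) (hxv : x ≠ val) :
    ∀ R : List Int,
      ((R ++ (x :: List.replicate occ val)).takeWhile (fun y => y == h)).length =
        ((R ++ [x]).takeWhile (fun y => y == h)).length := by
  intro R
  induction R with
  | nil =>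
    by_cases hx : x = h
    · have hv : ¬ val = h := fun hv => hxv (by rw [hx, hv])
      simp [hx, hv]
    · simp [hx]
  | cons r R IH =>
    by_cases hr : r = h
    · simp only [List.cons_append, List.takeWhile_cons, hr, beq_self_eq_true, if_true,
        List.length_cons]
      simpa using IH
    · simp [hr]

lemma pvLastOcc_rev :
    ∀ (u : List Int) (val : Int) (occ : Nat), 1 ≤ occ →
      pvLastOcc val occ u =
        ((u.reverse ++ List.replicate occ val).takeWhile
          (fun y => y == (u.reverse ++ List.replicate occ val).headD 0)).length := by
  intro u
  induction u with
  | nil =>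
    intro val occ hocc
    cases occ with
    | zero => omega
    | succ k => simp [pvLastOcc, List.replicate_succ]
  | cons x u IH =>
    intro val occ hocc
    have hrev : (x :: u).reverse ++ List.replicate occ val
        = u.reverse ++ (x :: List.replicate occ val) := by
      simp [List.reverse_cons, List.append_assoc]
    by_cases hxv : x = val
    · rw [show pvLastOcc val occ (x :: u) = pvLastOcc val (occ + 1) u from by
        simp [pvLastOcc, hxv]]
      rw [IH val (occ + 1) (by omega), hrev, hxv, ← List.replicate_succ]
    · rw [show pvLastOcc val occ (x :: u) = pvLastOcc x 1 u from by simp [pvLastOcc, hxv]]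
      rw [IH x 1 (by omega), hrev]
      have hh : (u.reverse ++ (x :: List.replicate occ val)).headD 0
          = (u.reverse ++ [x]).headD 0 := by
        cases h : u.reverse <;> simp
      rw [hh, pv_tw _ x val occ hxv u.reverse]
      simp

lemma pvD_expr (a : Int) (rest : List Int) :
    ((((a :: rest).reverse.takeWhile
        (fun y => y == (a :: rest).reverse.headD 0)).length : Nat) : Int)
      = (pvLastOcc a 1 rest : Int) := by
  rw [pvLastOcc_rev rest a 1 (by omega)]
  simp [List.reverse_cons]

lemma pv_getElem?_of_drop {l : List Int} {i : Nat} {x : Int} {u : List Int}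
    (h : l.drop i = x :: u) : l[i]? = some x := by
  have h0 : (l.drop i)[0]? = some x := by rw [h]; rfl
  rw [List.getElem?_drop] at h0
  simpa using h0

lemma pv_set2_eq (l : List Int) (np : Nat) (v : Int) (h : np + 2 ≤ l.length) :
    (l.set np v).set (np + 1) v = (l.take np ++ List.replicate 2 v) ++ l.drop (np + 2) := by
  apply List.ext_getElem
  · simp; omega
  · intro j hj hj2
    simp only [List.getElem_set, List.getElem_append, List.length_take, List.length_replicate,
      List.getElem_take, List.getElem_drop, List.getElem_replicate, List.length_append,
      Nat.min_eq_left (by omega : np ≤ l.length)]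
    split_ifs <;> first
      | rfl
      | omega
      | (congr 1; omega)

lemma pvSlice_len (l : List Int) (a k : Nat) (v : Int) (h : a + k ≤ l.length) :
    (pvSliceAssign l a k v).length = l.length := by
  simp [pvSliceAssign]; omega

lemma pvSlice_take (l : List Int) (a k : Nat) (v : Int) (h : a ≤ l.length) :
    (pvSliceAssign l a k v).take (a + k) = l.take a ++ List.replicate k v := by
  unfold pvSliceAssign
  exact List.take_left' (by simp; omega)

lemma pvSlice_drop (l : List Int) (a k : Nat) (v : Int) (h : a ≤ l.length) :
    (pvSliceAssign l a k v).drop (a + k) = l.drop (a + k) := by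
  unfold pvSliceAssign
  exact List.drop_left' (by simp; omega)

lemma pv_drop_of_drop_eq {l l' : List Int} {a i : Nat} (hai : a ≤ i)
    (h : l'.drop a = l.drop a) : l'.drop i = l.drop i := by
  have e : i = a + (i - a) := by omega
  rw [e, ← List.drop_drop, h, List.drop_drop]

-- the main loop invariant: from a state with finished prefix l.take np, a pending run of occ copies
-- of val, and the unread suffix u, the loop followed by the epilogue emits l.take np ++ pvProcA … u.
lemma pvLoop (m : Int) :
    ∀ (u : List Int) (i : Nat) (l : List Int) (occ np val : Int),
      l.length = i + u.length →
      l.drop i = u →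
      1 ≤ occ → 0 ≤ np → np + occ ≤ (i : Int) →
      (m = 1 → pvHasSingle val occ.toNat u = false) →
      pvFinA ((PySem.List.pyRange (i : Int) (l.length : Int)).foldl (pvStepA m) (l, occ, np, val))
        = l.take np.toNat ++ pvProcA m val occ.toNat u := by
  intro u
  induction u with
  | nil =>
    intro i l occ np val hlen hdrop hocc hnp hle _
    have hni : l.length = i := by simpa using hlen
    rw [hni]
    have hr : PySem.List.pyRange (i : Int) (i : Int) = [] := by simp [pysem]
    rw [hr]
    simp only [List.foldl_nil, pvFinA]
    have e1 : (np + occ).toNat = np.toNat + occ.toNat := by omega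
    rw [e1, pvSlice_take l np.toNat occ.toNat val (by omega)]
    simp [pvProcA]
  | cons x u' IH =>
    intro i l occ np val hlen hdrop hocc hnp hle hsing
    have hil : i < l.length := by simp [hlen]
    have hlt : (i : Int) < (l.length : Int) := by exact_mod_cast hil
    rw [PySem.List.pyRange_one_cons hlt]
    simp only [List.foldl_cons]
    have hx : (PySem.List.pyGet? l (i : Int)).getD 0 = x := by
      rw [PySem.List.pyGet?_natCast, pv_getElem?_of_drop hdrop]; rfl
    have hdrop1 : l.drop (i + 1) = u' := by
      rw [← List.tail_drop, hdrop]; rfl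
    have hcast1 : ((i : Int) + 1) = ((i + 1 : Nat) : Int) := by push_cast; ring
    simp only [pvStepA, hx]
    by_cases hxv : x = val
    · simp only [if_pos hxv]
      rw [hcast1, IH (i + 1) l (occ + 1) np val (by simp [hlen]; omega) hdrop1 (by omega) hnp
        (by push_cast; omega)
        (by intro hm1; have := hsing hm1; simp only [pvHasSingle, if_pos hxv] at this
            have e : (occ + 1).toNat = occ.toNat + 1 := by omega
            rw [e]; exact this)]
      have e : (occ + 1).toNat = occ.toNat + 1 := by omega
      simp [pvProcA, hxv, e]
    · simp only [if_neg hxv]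
      by_cases hoccm : occ = m
      · have hm1 : m ≠ 1 := by
          intro hm1
          have hs := hsing hm1
          simp only [pvHasSingle, if_neg hxv, Bool.or_eq_false_iff] at hs
          have : occ.toNat = 1 := by omega
          simp [this] at hs
        have hm2 : 2 ≤ m := by omega
        simp only [if_pos hoccm]
        have hnp2 : np.toNat + 2 ≤ i := by omega
        have e2 : (np + 1).toNat = np.toNat + 1 := by omega
        have e3 : (np + 2).toNat = np.toNat + 2 := by omega
        rw [e2, hcast1]
        have hlen' : ((l.set np.toNat val).set (np.toNat + 1) val).length = l.length := by simp
        have hdrop' : ((l.set np.toNat val).set (np.toNat + 1) val).drop (i + 1) = u' := by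
          rw [List.drop_set, if_pos (by omega), List.drop_set, if_pos (by omega)]
          exact hdrop1
        rw [show (l.length : Int) = (((l.set np.toNat val).set (np.toNat + 1) val).length : Int) by
          rw [hlen']]
        rw [IH (i + 1) ((l.set np.toNat val).set (np.toNat + 1) val) 1 (np + 2) x
          (by rw [hlen']; simp [hlen]; omega) hdrop' (by omega) (by omega) (by push_cast; omega)
          (by intro hm1'; exact absurd hm1' hm1)]
        have htake : ((l.set np.toNat val).set (np.toNat + 1) val).take ((np + 2).toNat)
            = l.take np.toNat ++ List.replicate 2 val := by
          rw [e3, pv_set2_eq l np.toNat val (by omega)]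
          exact List.take_left' (by simp; omega)
        rw [htake]
        have eocc : ((occ.toNat : Int)) = occ := by omega
        rw [show pvProcA m val occ.toNat (x :: u') = (if ((occ.toNat : Nat) : Int) = m then
            List.replicate 2 val else List.replicate occ.toNat val) ++ pvProcA m x 1 u' from by
          simp [pvProcA, hxv]]
        rw [if_pos (by rw [eocc]; exact hoccm)]
        simp [List.append_assoc]
      · simp only [if_neg hoccm]
        have hnpl : np.toNat ≤ l.length := by omega
        have hnk : np.toNat + occ.toNat ≤ i := by omega
        have hlen' : (pvSliceAssign l np.toNat occ.toNat val).length = l.length :=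
          pvSlice_len l np.toNat occ.toNat val (by omega)
        have hdrop' : (pvSliceAssign l np.toNat occ.toNat val).drop (i + 1) = u' := by
          rw [pv_drop_of_drop_eq (show np.toNat + occ.toNat ≤ i + 1 by omega)
            (pvSlice_drop l np.toNat occ.toNat val hnpl), hdrop1]
        have e4 : (np + occ).toNat = np.toNat + occ.toNat := by omega
        rw [hcast1]
        rw [show (l.length : Int) = ((pvSliceAssign l np.toNat occ.toNat val).length : Int) by
          rw [hlen']]
        rw [IH (i + 1) (pvSliceAssign l np.toNat occ.toNat val) 1 (np + occ) x
          (by rw [hlen']; simp [hlen]; omega) hdrop' (by omega) (by omega) (by push_cast; omega)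
          (by intro hm1
              have hs := hsing hm1
              simp only [pvHasSingle, if_neg hxv, Bool.or_eq_false_iff] at hs
              simpa using hs.2)]
        have htake : (pvSliceAssign l np.toNat occ.toNat val).take ((np + occ).toNat)
            = l.take np.toNat ++ List.replicate occ.toNat val := by
          rw [e4]; exact pvSlice_take l np.toNat occ.toNat val hnpl
        rw [htake]
        have eocc : ((occ.toNat : Int)) = occ := by omega
        rw [show pvProcA m val occ.toNat (x :: u') = (if ((occ.toNat : Nat) : Int) = m then
            List.replicate 2 val else List.replicate occ.toNat val) ++ pvProcA m x 1 u' from by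
          simp [pvProcA, hxv]]
        rw [if_neg (by rw [eocc]; exact hoccm)]
        simp [List.append_assoc]

lemma pvA_eq_procA (a : Int) (rest : List Int) (m : Int)
    (hpre : Pre_m_times_to_twice (a :: rest) m) :
    m_times_to_twice (a :: rest) m = pvProcA m a 1 rest := by
  unfold m_times_to_twice
  rw [if_neg (by simp)]
  have hlt : (0 : Int) < ((a :: rest).length : Int) := by simp
  have hx0 : (PySem.List.pyGet? (a :: rest) (0 : Int)).getD 0 = a := by
    have h := congrArg (fun o : Option Int => o.getD 0) (PySem.List.pyGet?_natCast (a :: rest) 0)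
    simpa using h
  have hstep : pvStepA m (a :: rest, 0, 0, a) 0 = (a :: rest, 1, 0, a) := by
    simp [pvStepA]
  rw [PySem.List.pyRange_one_cons hlt, List.foldl_cons, hx0, hstep]
  rw [show ((0 : Int) + 1) = ((1 : Nat) : Int) by norm_num]
  rw [pvLoop m rest 1 (a :: rest) 1 0 a (by simp [Nat.add_comm]) (by simp) (by omega) (by omega) (by simp)
    (by intro hm1
        unfold Pre_m_times_to_twice at hpre
        have hs : pvAnySingle (a :: rest) ≠ true := fun hs => hpre ⟨hm1, hs⟩
        simpa [pvAnySingle] using hs)]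
  simp

lemma pvAltGoFuel_congr (m : Int) :
    ∀ (f g : Nat) (u : List Int), u.length < f → u.length < g →
      pvAltGoFuel m f u = pvAltGoFuel m g u := by
  intro f
  induction f with
  | zero => intro g u hf; omega
  | succ f IHf =>
    intro g u hf hg
    cases g with
    | zero => omega
    | succ g =>
      cases u with
      | nil => rfl
      | cons x xs =>
        simp only [pvAltGoFuel]
        congr 1
        have hd := List.length_dropWhile_le (· == x) xs
        exact IHf g _ (by simp at hf; omega) (by simp at hg; omega)

lemma pvAlt_nil (m : Int) : m_times_to_twice_alt [] m = [] := rfl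

lemma pvAlt_cons (m x : Int) (xs : List Int) :
    m_times_to_twice_alt (x :: xs) m =
      (if ((1 + (xs.takeWhile (· == x)).length : Nat) : Int) = m then List.replicate 2 x
       else List.replicate (1 + (xs.takeWhile (· == x)).length) x) ++
        m_times_to_twice_alt (xs.dropWhile (· == x)) m := by
  unfold m_times_to_twice_alt
  simp only [List.length_cons, pvAltGoFuel]
  congr 1
  have hd := List.length_dropWhile_le (· == x) xs
  exact pvAltGoFuel_congr m _ _ _ (by omega) (by omega)

lemma pvProcA_eq_alt (m : Int) :
    ∀ (u : List Int) (val : Int) (occ : Nat),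
      ((pvLastOcc val occ u : Int) = m → m = 2) →
      pvProcA m val occ u =
        (if ((occ + (u.takeWhile (· == val)).length : Nat) : Int) = m then List.replicate 2 val
         else List.replicate (occ + (u.takeWhile (· == val)).length) val) ++
          m_times_to_twice_alt (u.dropWhile (· == val)) m := by
  intro u
  induction u with
  | nil =>
    intro val occ hc
    simp only [List.takeWhile_nil, List.dropWhile_nil, List.length_nil, Nat.add_zero, pvAlt_nil,
      List.append_nil, pvProcA]
    by_cases h : ((occ : Nat) : Int) = m
    · rw [if_pos h]
      have : occ = 2 := by
        have := hc (by simpa [pvLastOcc] using h)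
        omega
      rw [this]
    · rw [if_neg h]
  | cons x u IH =>
    intro val occ hc
    by_cases hxv : x = val
    · have hb : (x == val) = true := by simp [hxv]
      simp only [List.takeWhile_cons, List.dropWhile_cons, hb, if_pos, List.length_cons]
      have e : occ + ((u.takeWhile (· == val)).length + 1) = (occ + 1) + (u.takeWhile (· == val)).length := by omega
      rw [e]
      rw [show pvProcA m val occ (x :: u) = pvProcA m val (occ + 1) u by simp [pvProcA, hxv]]
      exact IH val (occ + 1) (by rwa [pvLastOcc, if_pos hxv] at hc)
    · have hb : (x == val) = false := by simp [hxv]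
      simp only [List.takeWhile_cons, List.dropWhile_cons, hb, Bool.false_eq_true, if_false,
        List.length_nil, Nat.add_zero]
      rw [pvAlt_cons]
      rw [show pvProcA m val occ (x :: u) = (if ((occ : Nat) : Int) = m then List.replicate 2 val
        else List.replicate occ val) ++ pvProcA m x 1 u by simp [pvProcA, hxv]]
      rw [IH x 1 (by rwa [pvLastOcc, if_neg hxv] at hc)]

lemma pvProcA_ne_alt (m : Int) :
    ∀ (u : List Int) (val : Int) (occ : Nat),
      1 ≤ occ → (pvLastOcc val occ u : Int) = m → m ≠ 2 →
      pvProcA m val occ u ≠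
        (if ((occ + (u.takeWhile (· == val)).length : Nat) : Int) = m then List.replicate 2 val
         else List.replicate (occ + (u.takeWhile (· == val)).length) val) ++
          m_times_to_twice_alt (u.dropWhile (· == val)) m := by
  intro u
  induction u with
  | nil =>
    intro val occ h1 hlast hm2
    have hocc : ((occ : Nat) : Int) = m := by simpa [pvLastOcc] using hlast
    simp only [List.takeWhile_nil, List.dropWhile_nil, List.length_nil, Nat.add_zero, pvAlt_nil,
      List.append_nil, pvProcA, if_pos hocc]
    intro heq
    have := congrArg List.length heq
    simp at this
    omega
  | cons x u IH =>
    intro val occ h1 hlast hm2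
    by_cases hxv : x = val
    · have hb : (x == val) = true := by simp [hxv]
      simp only [List.takeWhile_cons, List.dropWhile_cons, hb, if_pos, List.length_cons]
      have e : occ + ((u.takeWhile (· == val)).length + 1) = (occ + 1) + (u.takeWhile (· == val)).length := by omega
      rw [e]
      rw [show pvProcA m val occ (x :: u) = pvProcA m val (occ + 1) u by simp [pvProcA, hxv]]
      exact IH val (occ + 1) (by omega) (by rwa [pvLastOcc, if_pos hxv] at hlast) hm2
    · have hb : (x == val) = false := by simp [hxv]
      simp only [List.takeWhile_cons, List.dropWhile_cons, hb, Bool.false_eq_true, if_false,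
        List.length_nil, Nat.add_zero]
      rw [pvAlt_cons]
      rw [show pvProcA m val occ (x :: u) = (if ((occ : Nat) : Int) = m then List.replicate 2 val
        else List.replicate occ val) ++ pvProcA m x 1 u by simp [pvProcA, hxv]]
      intro heq
      exact IH x 1 (by omega) (by rwa [pvLastOcc, if_neg hxv] at hlast) hm2
        (List.append_cancel_left heq)

-- ===== VERDICT (by name: the statement is the Claim_ definition above) =====
theorem m_times_to_twice_spec : Claim_unchanged_m_times_to_twice := by
  intro arr m _ hpre hD
  cases arr with
  | nil => simp [m_times_to_twice, pvAlt_nil]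
  | cons a rest =>
    rw [pvA_eq_procA a rest m hpre]
    have hc : (pvLastOcc a 1 rest : Int) = m → m = 2 := by
      intro h
      by_contra hm2
      exact hD ⟨hm2, by simp, by rw [pvD_expr]; exact h⟩
    rw [pvProcA_eq_alt m rest a 1 hc, ← pvAlt_cons]

theorem m_times_to_twice_changed : Claim_changed_m_times_to_twice := by
  unfold Claim_changed_m_times_to_twice; decide

theorem m_times_to_twice_tight : Claim_exact_m_times_to_twice := by
  intro arr m _ hpre hD
  obtain ⟨hm2, hne, hlast⟩ := hD
  cases arr with
  | nil => exact absurd rfl hne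
  | cons a rest =>
    rw [pvA_eq_procA a rest m hpre, pvAlt_cons]
    exact pvProcA_ne_alt m rest a 1 (by omega) (by rw [← pvD_expr]; exact hlast) hm2
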